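-- pv_equiv track=rewrite | github.com/satyms/RAG-system | app/agents/retrieval_agent.py | _prioritize_chunks
-- ===== SOURCE A (Python) =====
-- def _prioritize_chunks(chunks: list[dict], token_budget: int = 4000) -> list[dict]:
--     """Select chunks that fit within the token budget, prioritising by score."""
--     # Rough token estimate: 1 token ≈ 4 chars
--     budget_chars = token_budget * 4
--     selected = []
--     total_chars = 0
--
--     for chunk in chunks:
--         content = chunk.get("content", "")
--         if total_chars + len(content) > budget_chars:
--             break
--         selected.append(chunk)
--         total_chars += len(content)
--
--     return selected
-- ===== SOURCE B (Python) =====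
-- def _prioritize_chunks(chunks: list[dict], token_budget: int = 4000) -> list[dict]:
--     budget_chars = token_budget * 4
--     # materialise the prefix-sum table of content lengths
--     prefix = []
--     total = 0
--     for chunk in chunks:
--         total += len(chunk.get("content", ""))
--         prefix.append(total)
--     # separate pass: first index whose cumulative length exceeds the budget
--     cutoff = len(chunks)
--     for i, p in enumerate(prefix):
--         if p > budget_chars:
--             cutoff = i
--             break
--     return chunks[:cutoff]
-- ===== Notes on version B (the rewrite author's own statement) =====
-- stated objective: alternative
-- what changed: Replaces the scan-with-early-break over (selected, total_chars) state by a materialised prefix-sum table of content lengths plus a separate cutoff-index search, returning chunks[:cutoff].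
import Mathlib
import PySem

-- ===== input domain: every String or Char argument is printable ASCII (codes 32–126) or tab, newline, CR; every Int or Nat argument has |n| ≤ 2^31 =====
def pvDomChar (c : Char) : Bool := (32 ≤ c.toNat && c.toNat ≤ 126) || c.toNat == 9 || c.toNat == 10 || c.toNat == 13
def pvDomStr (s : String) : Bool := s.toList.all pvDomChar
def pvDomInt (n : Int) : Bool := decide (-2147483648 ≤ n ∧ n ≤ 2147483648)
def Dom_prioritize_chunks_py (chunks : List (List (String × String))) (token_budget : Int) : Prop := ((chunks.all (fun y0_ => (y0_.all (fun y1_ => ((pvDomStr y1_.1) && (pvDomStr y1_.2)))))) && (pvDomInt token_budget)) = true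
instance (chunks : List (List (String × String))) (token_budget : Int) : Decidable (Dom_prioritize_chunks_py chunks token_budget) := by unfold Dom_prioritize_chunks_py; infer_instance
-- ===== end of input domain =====

-- B replaces A's scan-with-early-break by a materialised prefix-sum table plus a
-- separate cutoff-index search (objective: alternative; return value only, same cost).

-- ===== PORT A =====
-- A's loop over (selected, total_chars) with break, as structural recursion on chunks.
def pvA_loop (budget_chars : Int) : List (List (String × String)) →
    List (List (String × String)) → Int → List (List (String × String))
  | [], selected, _ => selected
  | chunk :: rest, selected, total_chars =>
    let content := PySem.Dict.getD (PySem.Dict.mk chunk) "content" ""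
    if total_chars + (PySem.Str.len content : Int) > budget_chars then selected
    else pvA_loop budget_chars rest (selected ++ [chunk]) (total_chars + PySem.Str.len content)

def prioritize_chunks_py (chunks : List (List (String × String))) (token_budget : Int) : List (List (String × String)) :=
  pvA_loop (token_budget * 4) chunks [] 0

-- ===== PORT B =====
-- running prefix sums of the content lengths
def pvB_prefix : List (List (String × String)) → Int → List Int
  | [], _ => []
  | chunk :: rest, total =>
    let total' := total + (PySem.Str.len (PySem.Dict.getD (PySem.Dict.mk chunk) "content" "") : Int)
    total' :: pvB_prefix rest total'

-- first index whose prefix sum exceeds the budget, else the list length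
def pvB_cutoff (budget_chars : Int) : List Int → Nat
  | [] => 0
  | p :: rest => if p > budget_chars then 0 else 1 + pvB_cutoff budget_chars rest

def prioritize_chunks_py_alt (chunks : List (List (String × String))) (token_budget : Int) : List (List (String × String)) :=
  let budget_chars := token_budget * 4
  let prefixSums := pvB_prefix chunks 0
  chunks.take (pvB_cutoff budget_chars prefixSums)

-- ===== PRECONDITION & SPEC =====
def Spec_prioritize_chunks_py (chunks : List (List (String × String))) (token_budget : Int) (out : List (List (String × String))) : Prop := out = prioritize_chunks_py_alt chunks token_budget
instance (chunks : List (List (String × String))) (token_budget : Int) (out : List (List (String × String))) : Decidable (Spec_prioritize_chunks_py chunks token_budget out) := by unfold Spec_prioritize_chunks_py; infer_instance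

-- ===== CLAIM (what is proved, stated in full; the proofs are below) =====
def Claim_equal_prioritize_chunks_py : Prop := ∀ (chunks : List (List (String × String))) (token_budget : Int), Dom_prioritize_chunks_py chunks token_budget → Spec_prioritize_chunks_py chunks token_budget (prioritize_chunks_py chunks token_budget)

-- ===== LEMMAS AND PROOFS =====
theorem pvA_loop_eq_take (budget_chars : Int) (chunks : List (List (String × String)))
    (selected : List (List (String × String))) (total : Int) :
    pvA_loop budget_chars chunks selected total
      = selected ++ chunks.take (pvB_cutoff budget_chars (pvB_prefix chunks total)) := by
  induction chunks generalizing selected total with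
  | nil => simp [pvA_loop, pvB_prefix, pvB_cutoff]
  | cons chunk rest ih =>
    simp only [pvA_loop, pvB_prefix, pvB_cutoff]
    split_ifs with h
    · simp
    · rw [ih, Nat.add_comm, List.take_succ_cons]; simp

-- ===== VERDICT (by name: the statement is the Claim_ definition above) =====
theorem prioritize_chunks_py_spec : Claim_equal_prioritize_chunks_py := by
  intro chunks token_budget _
  unfold Spec_prioritize_chunks_py prioritize_chunks_py prioritize_chunks_py_alt
  simp [pvA_loop_eq_take]
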